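-- pv_equiv track=rewrite | github.com/marsmanXmachina/unsigned-bot | unsigned_bot/deconstruct.py | get_subpattern
-- ===== SOURCE A (Python) =====
-- from collections import defaultdict, Counter
--
-- def order_by_color(layers: list) -> dict:
--     ordered = defaultdict(list)
--
--     for layer in layers:
--         color = layer[0]
--         ordered[color].append(layer)
--
--     return ordered
--
-- def get_subpattern(layers: list) -> dict:
--     """Get grouped layers by colors"""
--
--     layers_by_color = order_by_color(layers)
--
--     subpattern = defaultdict(list)
--     for color, color_layers in layers_by_color.items():
--         for layer in color_layers:
--
--             # convert layer tuple to list to modify, then convert back to tuple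
--             layer_formatted = list(layer)
--             layer_formatted[0] = None
--             layer_formatted = tuple(layer_formatted)
--
--             subpattern[color].append(layer_formatted)
--
--     return subpattern
-- ===== SOURCE B (Python) =====
-- from collections import defaultdict
--
-- def get_subpattern(layers: list) -> dict:
--     """Get grouped layers by colors"""
--     subpattern = defaultdict(list)
--     for layer in layers:
--         subpattern[layer[0]].append((None,) + tuple(layer[1:]))
--     return subpattern
-- ===== Notes on version B (the rewrite author's own statement) =====
-- stated objective: simpler
-- what changed: Replaces the build-group-dict-then-re-traverse two-phase structure (order_by_color followed by a nested loop that reformats each layer) with a single pass that appends the nulled tuple directly into the result dict; the helper and the intermediate dict are gone.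
import Mathlib
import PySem

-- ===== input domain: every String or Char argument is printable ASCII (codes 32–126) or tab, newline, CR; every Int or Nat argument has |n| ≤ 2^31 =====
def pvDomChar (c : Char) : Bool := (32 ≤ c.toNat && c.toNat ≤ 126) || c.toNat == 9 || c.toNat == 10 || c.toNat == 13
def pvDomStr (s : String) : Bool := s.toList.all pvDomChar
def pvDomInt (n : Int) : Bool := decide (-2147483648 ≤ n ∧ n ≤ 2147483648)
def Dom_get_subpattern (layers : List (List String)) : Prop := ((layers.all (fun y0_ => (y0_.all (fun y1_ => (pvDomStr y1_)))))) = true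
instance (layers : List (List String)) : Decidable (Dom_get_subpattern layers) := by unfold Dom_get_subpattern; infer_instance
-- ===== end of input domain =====

-- B replaces A's two-phase build-group-dict-then-re-traverse with one direct pass (objective: simpler).

-- ===== PORT A =====
def order_by_color (layers : List (List String)) : PySem.Dict String (List (List String)) :=
  layers.foldl
    (fun ordered layer =>
      -- color = layer[0]; layer[0] raises IndexError on an empty layer: excluded by Pre_
      ordered.modify (PySem.List.pyGetD layer 0 "") [] (fun v => v ++ [layer]))
    PySem.Dict.empty

def get_subpattern (layers : List (List String)) : List (String × List (List (Option String))) :=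
  let layers_by_color := order_by_color layers
  let subpattern :=
    layers_by_color.items.foldl
      (fun subpattern p =>
        p.2.foldl
          (fun subpattern layer =>
            let layer_formatted := (layer.map some).set 0 none
            subpattern.modify p.1 [] (fun v => v ++ [layer_formatted]))
          subpattern)
      PySem.Dict.empty
  subpattern.items

-- ===== PORT B =====
def get_subpattern_alt (layers : List (List String)) : List (String × List (List (Option String))) :=
  (layers.foldl
    (fun subpattern layer =>
      subpattern.modify (PySem.List.pyGetD layer 0 "") []
        (fun v => v ++ [none :: (layer.drop 1).map some]))
    PySem.Dict.empty).items

-- ===== PRECONDITION & SPEC =====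
-- Pre_ excludes inputs containing an empty layer: there 'layer[0]' makes A (and B) raise IndexError.
def Pre_get_subpattern (layers : List (List String)) : Prop := ∀ l ∈ layers, l ≠ []
instance (layers : List (List String)) : Decidable (Pre_get_subpattern layers) := by unfold Pre_get_subpattern; infer_instance
def pvWitness_get_subpattern : List (List String) := [["red", "a"], ["blue"], ["red", "b"]]

def Spec_get_subpattern (layers : List (List String)) (out : List (String × List (List (Option String)))) : Prop := out = get_subpattern_alt layers
instance (layers : List (List String)) (out : List (String × List (List (Option String)))) : Decidable (Spec_get_subpattern layers out) := by unfold Spec_get_subpattern; infer_instance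

-- ===== CLAIM (what is proved, stated in full; the proofs are below) =====
def Claim_equal_get_subpattern : Prop := ∀ (layers : List (List String)), Dom_get_subpattern layers → Pre_get_subpattern layers → Spec_get_subpattern layers (get_subpattern layers)

-- ===== LEMMAS AND PROOFS =====

-- characterization of a 'd[key b].append(f b)' loop from an empty dict
theorem loop_getD {β γ : Type} (key : β → String) (f : β → γ) (l : List β) (c : String) :
    (l.foldl (fun d b => d.modify (key b) ([] : List γ) (fun v => v ++ [f b])) PySem.Dict.empty).getD c []
      = (l.filter (fun b => key b == c)).map f := by
  have h := PySem.Dict.getD_foldl_modify_append (l.map (fun b => (key b, f b))) PySem.Dict.empty c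
  rw [List.foldl_map] at h
  simpa [List.filter_map, Function.comp] using h

theorem loop_keys {β γ : Type} (key : β → String) (f : β → γ) (l : List β) :
    (l.foldl (fun d b => d.modify (key b) ([] : List γ) (fun v => v ++ [f b])) PySem.Dict.empty).keys
      = PySem.Set.ofList (l.map key) := by
  have h := PySem.Dict.keys_foldl_modify_key l key ([] : List γ) (fun _ b v => v ++ [f b]) PySem.Dict.empty
  simpa [PySem.Dict.keys_empty, PySem.Set.update_nil_left] using h

theorem loop_nodup {β γ : Type} (key : β → String) (f : β → γ) (l : List β) :
    (l.foldl (fun d b => d.modify (key b) ([] : List γ) (fun v => v ++ [f b])) PySem.Dict.empty).keys.Nodup :=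
  PySem.Dict.nodup_keys_foldl_modify_key l key ([] : List γ) (fun _ b v => v ++ [f b])
    PySem.Dict.empty (by simp [PySem.Dict.keys_empty])

theorem loop_items {β γ : Type} (key : β → String) (f : β → γ) (l : List β) :
    (l.foldl (fun d b => d.modify (key b) ([] : List γ) (fun v => v ++ [f b])) PySem.Dict.empty).items
      = (PySem.Set.ofList (l.map key)).map
          (fun c => (c, (l.filter (fun b => key b == c)).map f)) := by
  rw [PySem.Dict.items_eq_map_keys _ (loop_nodup key f l) [], loop_keys]
  exact List.map_congr_left fun c _ => by rw [loop_getD]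

theorem ofList_map_const {α : Type} (ls : List α) (c : String) (h : ls ≠ []) :
    PySem.Set.ofList (ls.map (fun _ => c)) = [c] := by
  induction ls with
  | nil => exact absurd rfl h
  | cons x t ih =>
    rw [List.map_cons, PySem.Set.ofList_cons]
    rcases t with _ | ⟨y, t'⟩
    · simp [PySem.Set.ofList, PySem.Set.discard]
    · rw [ih (by simp)]
      simp [PySem.Set.discard]

theorem ofList_fst_flatMap (K : List String) (h : String → List (List String)) (hnd : K.Nodup)
    (hne : ∀ c ∈ K, h c ≠ []) :
    PySem.Set.ofList ((K.flatMap (fun c => (h c).map (fun l => (c, l)))).map Prod.fst) = K := by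
  induction K with
  | nil => rfl
  | cons c K' ih =>
    rw [List.flatMap_cons, List.map_append, PySem.Set.ofList_append, List.map_map]
    rw [show (Prod.fst ∘ fun (l : List String) => (c, l)) = (fun _ => c) from rfl]
    rw [ofList_map_const _ c (hne c (by simp))]
    rw [PySem.Set.update_eq_append_filter]
    rw [ih (List.Nodup.of_cons hnd) (fun c' hc' => hne c' (List.mem_cons_of_mem _ hc'))]
    have hcK' : c ∉ K' := (List.nodup_cons.mp hnd).1
    have : K'.filter (fun y => !PySem.Set.contains [c] y) = K' :=
      List.filter_eq_self.mpr (fun y hy => by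
        simp [PySem.Set.contains]
        exact fun hyc => absurd (hyc ▸ hy) hcK')
    rw [this]
    rfl

theorem flatMap_single {α β : Type} (K : List α) (F : α → List β) (c : α) (hnd : K.Nodup)
    (hc : c ∈ K) (h0 : ∀ c' ∈ K, c' ≠ c → F c' = []) : K.flatMap F = F c := by
  induction K with
  | nil => cases hc
  | cons a K' ih =>
    rw [List.flatMap_cons]
    rcases List.mem_cons.mp hc with rfl | hcK'
    · have : K'.flatMap F = [] := by
        apply List.flatMap_eq_nil_iff.mpr
        intro c' hc'
        exact h0 c' (List.mem_cons_of_mem _ hc') (fun h => (List.nodup_cons.mp hnd).1 (h ▸ hc'))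
      rw [this, List.append_nil]
    · have ha : F a = [] := h0 a (List.mem_cons_self ..) (fun h => (List.nodup_cons.mp hnd).1 (h ▸ hcK'))
      rw [ha, List.nil_append]
      exact ih (List.Nodup.of_cons hnd) hcK' (fun c' hc' => h0 c' (List.mem_cons_of_mem _ hc'))

theorem get_subpattern_spec : Claim_equal_get_subpattern := by
  unfold Claim_equal_get_subpattern
  intro layers _ hpre
  unfold Spec_get_subpattern
  -- abbreviations
  set key : List String → String := fun l => PySem.List.pyGetD l 0 "" with hkey
  set grp : String → List (List String) := fun c => layers.filter (fun l => key l == c) with hgrp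
  set K : List String := PySem.Set.ofList (layers.map key) with hK
  have hKnd : K.Nodup := PySem.Set.nodup_ofList _
  have hgrpne : ∀ c ∈ K, grp c ≠ [] := by
    intro c hcK
    rw [hK, PySem.Set.mem_ofList] at hcK
    obtain ⟨l, hl, hlc⟩ := List.mem_map.mp hcK
    intro hnil
    have : l ∈ grp c := by rw [hgrp]; simp [List.mem_filter, hl, hlc]
    rw [hnil] at this; cases this
  -- B's one-pass dict
  have hB : get_subpattern_alt layers
      = K.map (fun c => (c, (grp c).map (fun l => (none : Option String) :: (l.drop 1).map some))) :=
    loop_items key (fun l => (none : Option String) :: (l.drop 1).map some) layers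
  -- A phase 1: the grouping dict's items
  have hOrd : (order_by_color layers).items = K.map (fun c => (c, grp c)) := by
    have h := loop_items key (fun l => l) layers
    simpa using h
  -- A phase 2: flatten the nested fold into a single fold over key-layer pairs
  have hAflat : get_subpattern layers
      = (((order_by_color layers).items.flatMap (fun p => p.2.map (fun l => (p.1, l)))).foldl
          (fun d q => d.modify q.1 [] (fun v => v ++ [((q.2.map some).set 0 none)]))
          PySem.Dict.empty).items := by
    unfold get_subpattern
    rw [List.foldl_flatMap]
    simp only [List.foldl_map]
  have hA : get_subpattern layers
      = K.map (fun c => (c, (grp c).map (fun l => ((l.map some).set 0 none)))) := by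
    rw [hAflat, hOrd]
    rw [List.flatMap_map]
    have hitems := loop_items (β := String × List String) Prod.fst
      (fun q => ((q.2.map some).set 0 none))
      (K.flatMap (fun c => (grp c).map (fun l => (c, l))))
    rw [hitems]
    rw [ofList_fst_flatMap K grp hKnd hgrpne]
    apply List.map_congr_left
    intro c hcK
    have hfil : (K.flatMap (fun c' => (grp c').map (fun l => (c', l)))).filter (fun q => q.1 == c)
        = (grp c).map (fun l => (c, l)) := by
      have : ∀ c' : String, ((grp c').map (fun l => (c', l))).filter (fun q => q.1 == c)
          = if c' = c then (grp c).map (fun l => (c, l)) else [] := by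
        intro c'
        by_cases hc' : c' = c
        · subst hc'; simp [List.filter_map, Function.comp_def]
        · simp [List.filter_map, Function.comp_def, hc']
      rw [List.filter_flatMap]
      calc K.flatMap (fun c' => ((grp c').map (fun l => (c', l))).filter (fun q => q.1 == c))
          = ((grp c).map (fun l => (c, l))).filter (fun q => q.1 == c) := by
            apply flatMap_single K _ c hKnd hcK
            intro c' _ hne
            rw [this c', if_neg hne]
        _ = (grp c).map (fun l => (c, l)) := by simp [this c]
    rw [hfil, List.map_map]
    rfl
  -- combine
  rw [hA, hB]
  apply List.map_congr_left
  intro c hcK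
  refine congrArg _ ?_
  apply List.map_congr_left
  intro l hl
  have hlmem : l ∈ layers := List.mem_of_mem_filter (by rw [hgrp] at hl; exact hl)
  rcases l with _ | ⟨x, t⟩
  · exact absurd rfl (hpre _ hlmem)
  · simp
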